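-- pv_equiv track=rewrite | github.com/mgorabbani/PropContext | app/services/patcher/ops.py | _table_bounds
-- ===== SOURCE A (Python) =====
-- from collections.abc import Mapping, Sequence
--
-- def _is_table_row(line: str) -> bool:
--     return line.lstrip().startswith("|") and line.rstrip().endswith("|")
--
-- def _table_bounds(lines: Sequence[str]) -> tuple[int, int] | None:
--     start = None
--     for idx, line in enumerate(lines):
--         if _is_table_row(line):
--             start = idx
--             break
--     if start is None:
--         return None
--     end = start
--     while end < len(lines) and (_is_table_row(lines[end]) or not lines[end].strip()):
--         if not _is_table_row(lines[end]) and end > start: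
--             break
--         end += 1
--     return start, end
-- ===== SOURCE B (Python) =====
-- def _is_table_row(line: str) -> bool:
--     return line.lstrip().startswith("|") and line.rstrip().endswith("|")
--
-- def _table_bounds(lines):
--     start = None
--     for idx, line in enumerate(lines):
--         if _is_table_row(line):
--             if start is None:
--                 start = idx
--         elif start is not None:
--             return start, idx
--     if start is None:
--         return None
--     return start, len(lines)
-- ===== Notes on version B (the rewrite author's own statement) =====
-- stated objective: simpler
-- what changed: Replaces A's find-then-extend two-loop structure (index search loop plus an indexed while loop with a blank-line clause that is effectively dead) with one linear pass over enumerate(lines) carrying a single 'start' state variable.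
import Mathlib
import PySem

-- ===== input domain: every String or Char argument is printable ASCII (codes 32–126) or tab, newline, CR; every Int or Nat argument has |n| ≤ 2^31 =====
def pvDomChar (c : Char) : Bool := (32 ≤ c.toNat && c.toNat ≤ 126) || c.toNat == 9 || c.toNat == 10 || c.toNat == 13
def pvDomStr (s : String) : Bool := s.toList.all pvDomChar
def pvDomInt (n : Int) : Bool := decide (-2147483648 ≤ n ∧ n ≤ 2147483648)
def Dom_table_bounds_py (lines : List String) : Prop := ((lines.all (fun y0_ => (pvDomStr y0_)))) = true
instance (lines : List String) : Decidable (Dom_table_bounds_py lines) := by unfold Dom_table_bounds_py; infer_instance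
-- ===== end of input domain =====

-- B replaces A's find-then-extend two-loop structure with one linear pass carrying a 'start' state (objective: simpler).

-- ===== PORT A =====
-- _is_table_row (identical helper in both Python files)
def is_table_row_py (line : String) : Bool :=
  PySem.Str.startswith (PySem.Str.lstrip line) "|" && PySem.Str.endswith (PySem.Str.rstrip line) "|"

-- A's first loop: 'for idx, line in enumerate(lines): if _is_table_row(line): start = idx; break'
def findStartA : List String → Nat → Option Nat
  | [], _ => none
  | l :: ls, idx => if is_table_row_py l then some idx else findStartA ls (idx + 1)

-- A's while loop: 'while end < len(lines) and (_is_table_row(lines[end]) or not lines[end].strip()): if ... break; end += 1'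
def extendEndA (lines : List String) (start e : Nat) : Nat :=
  if h : e < lines.length ∧
      (is_table_row_py (lines.getD e "") || (PySem.Str.strip (lines.getD e "") == "")) then
    if !is_table_row_py (lines.getD e "") && start < e then e
    else extendEndA lines start (e + 1)
  else e
termination_by lines.length - e
decreasing_by omega

def table_bounds_py (lines : List String) : Option (Int × Int) :=
  match findStartA lines 0 with
  | none => none
  | some s => some ((s : Int), ((extendEndA lines s s : Nat) : Int))

-- ===== PORT B =====
-- B's single pass: state = (idx, start : Option Nat); returns as soon as a started run ends.
def loopB : List String → Nat → Option Nat → Option (Int × Int)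
  | [], _, none => none
  | [], idx, some s => some ((s : Int), (idx : Int))
  | l :: ls, idx, none =>
      if is_table_row_py l then loopB ls (idx + 1) (some idx) else loopB ls (idx + 1) none
  | l :: ls, idx, some s =>
      if is_table_row_py l then loopB ls (idx + 1) (some s) else some ((s : Int), (idx : Int))

def table_bounds_py_alt (lines : List String) : Option (Int × Int) :=
  loopB lines 0 none

-- ===== PRECONDITION & SPEC =====
def Spec_table_bounds_py (lines : List String) (out : Option (Int × Int)) : Prop := out = table_bounds_py_alt lines
instance (lines : List String) (out : Option (Int × Int)) : Decidable (Spec_table_bounds_py lines out) := by unfold Spec_table_bounds_py; infer_instance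

-- ===== CLAIM (what is proved, stated in full; the proofs are below) =====
def Claim_equal_table_bounds_py : Prop := ∀ (lines : List String), Dom_table_bounds_py lines → Spec_table_bounds_py lines (table_bounds_py lines)

-- ===== LEMMAS AND PROOFS =====

-- length of the run of table rows at the head
def cwTR (ls : List String) : Nat := (ls.takeWhile is_table_row_py).length

theorem cwTR_cons_pos {l : String} {ls : List String} (h : is_table_row_py l = true) :
    cwTR (l :: ls) = cwTR ls + 1 := by
  simp [cwTR, h]

theorem cwTR_cons_neg {l : String} {ls : List String} (h : is_table_row_py l = false) :
    cwTR (l :: ls) = 0 := by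
  simp [cwTR, h]

theorem findStartA_some {ls : List String} {i s : Nat}
    (h : findStartA ls i = some s) :
    ∃ k, s = i + k ∧ k < ls.length ∧ is_table_row_py (ls.getD k "") = true := by
  induction ls generalizing i with
  | nil => simp [findStartA] at h
  | cons l ls ih =>
    cases hl : is_table_row_py l with
    | true =>
      refine ⟨0, ?_, by simp, by simpa [List.getD] using hl⟩
      simp [findStartA, hl] at h; omega
    | false =>
      simp [findStartA, hl] at h
      obtain ⟨k, hk, hlt, hrow⟩ := ih h
      exact ⟨k + 1, by omega, by simp; omega, by simpa [List.getD] using hrow⟩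

theorem drop_cons_getD {ls : List String} {e : Nat} (hlt : e < ls.length) :
    ls.drop e = ls.getD e "" :: ls.drop (e + 1) := by
  rw [List.getD_eq_getElem ls "" hlt]; exact List.drop_eq_getElem_cons hlt

theorem extendEndA_gt (ls : List String) (s : Nat) :
    ∀ e, s < e → extendEndA ls s e = e + cwTR (ls.drop e) := by
  intro e
  fun_induction extendEndA ls s e with
  | case1 e h hb =>
    intro hse
    simp only [Bool.and_eq_true, Bool.not_eq_true'] at hb
    rw [drop_cons_getD h.1, cwTR_cons_neg hb.1]
    omega
  | case2 e h hb ih =>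
    intro hse
    have hrow : is_table_row_py (ls.getD e "") = true := by
      cases h0 : is_table_row_py (ls.getD e "") with
      | true => rfl
      | false =>
        simp only [Bool.and_eq_true, Bool.not_eq_true', decide_eq_true_eq, not_and, h0] at hb
        exact absurd hse (hb trivial)
    rw [ih (by omega), drop_cons_getD h.1, cwTR_cons_pos hrow]
    omega
  | case3 e h =>
    intro hse
    rcases Nat.lt_or_ge e ls.length with hlt | hge
    · have hrow : is_table_row_py (ls.getD e "") = false := by
        cases h0 : is_table_row_py (ls.getD e "") with
        | false => rfl
        | true => exact absurd ⟨hlt, by rw [Bool.or_eq_true]; exact Or.inl h0⟩ h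
      rw [drop_cons_getD hlt, cwTR_cons_neg hrow]
      omega
    · simp [List.drop_eq_nil_of_le hge, cwTR]

theorem extendEndA_self (ls : List String) (s : Nat)
    (hlt : s < ls.length) (hrow : is_table_row_py (ls.getD s "") = true) :
    extendEndA ls s s = s + cwTR (ls.drop s) := by
  rw [extendEndA]
  rw [dif_pos ⟨hlt, by rw [Bool.or_eq_true]; exact Or.inl hrow⟩,
    if_neg (by simp only [hrow, Bool.not_true, Bool.false_and]; exact Bool.false_ne_true)]
  rw [extendEndA_gt ls s (s + 1) (by omega), drop_cons_getD hlt, cwTR_cons_pos hrow]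
  omega

theorem loopB_started (ls : List String) :
    ∀ idx s, loopB ls idx (some s) = some ((s : Int), ((idx + cwTR ls : Nat) : Int)) := by
  induction ls with
  | nil => intro idx s; simp [loopB, cwTR]
  | cons l ls ih =>
    intro idx s
    cases hl : is_table_row_py l with
    | false => simp [loopB, hl, cwTR_cons_neg hl]
    | true =>
      simp only [loopB, hl, if_true, ih, cwTR_cons_pos hl]
      norm_num; omega

theorem loopB_none (ls : List String) :
    ∀ idx, loopB ls idx none =
      match findStartA ls idx with
      | none => none
      | some s => some ((s : Int), ((s + cwTR (ls.drop (s - idx)) : Nat) : Int)) := by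
  induction ls with
  | nil => intro idx; simp [loopB, findStartA]
  | cons l ls ih =>
    intro idx
    cases hl : is_table_row_py l with
    | false =>
      simp only [loopB, hl, Bool.false_eq_true, if_false, ih, findStartA]
      cases hfs : findStartA ls (idx + 1) with
      | none => rfl
      | some s =>
        obtain ⟨k, hk, -, -⟩ := findStartA_some hfs
        have h1 : s - idx = (s - (idx + 1)) + 1 := by omega
        simp [h1]
    | true =>
      simp only [loopB, hl, if_true, loopB_started, findStartA]
      simp only [Nat.sub_self, List.drop_zero, cwTR_cons_pos hl]
      norm_num; omega

-- ===== VERDICT (by name: the statement is the Claim_ definition above) =====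
theorem table_bounds_py_spec : Claim_equal_table_bounds_py := by
  intro lines _
  unfold Spec_table_bounds_py table_bounds_py table_bounds_py_alt
  rw [loopB_none]
  cases hfs : findStartA lines 0 with
  | none => rfl
  | some s =>
    obtain ⟨k, hk, hlt, hrow⟩ := findStartA_some hfs
    have hs : s = k := by omega
    subst hs
    dsimp only
    rw [extendEndA_self lines s hlt hrow]
    norm_num
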